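-- pv_equiv track=rewrite | github.com/dankoga/URIOnlineJudge--Python-3.9 | URI_1580.py | factorial_mod
-- ===== SOURCE A (Python) =====
-- MOD = 1000000007
--
-- def factorial_mod(n, f_list):
--     # if n > MOD, returns (m, (n!/MOD^m) % MOD) where m is the MOD multiplicity
--     if n < MOD:
--         return [0, f_list[n]]
--     else:
--         f = 1
--         m = 0
--         while n > 1:
--             if (n // MOD) % 2 > 0:
--                 f = MOD - f
--             f = (f * f_list[n % MOD]) % MOD
--             n //= MOD
--             m += n
--         return m, f
-- ===== SOURCE B (Python) =====
-- MOD = 1000000007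
--
-- def factorial_mod(n, f_list):
--     # if n > MOD, returns (m, (n!/MOD^m) % MOD) where m is the MOD multiplicity
--     if n < MOD:
--         return [0, f_list[n]]
--     m, prod, s = _chain(n, f_list)
--     return m, (-prod if s % 2 == 1 else prod) % MOD
--
-- def _chain(q, f_list):
--     # recursively accumulate (multiplicity, unsigned digit product mod MOD,
--     # number of sign flips) over the base-MOD quotient chain of q
--     if q <= 1:
--         return 0, 1, 0
--     h = q // MOD
--     m, prod, s = _chain(h, f_list)
--     return m + h, prod * f_list[q % MOD] % MOD, s + h % 2
-- ===== Notes on version B (the rewrite author's own statement) =====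
-- stated objective: alternative
-- what changed: A's single imperative loop that threads the signed residue f through stepwise MOD-f flips is replaced by a recursive helper that returns a (multiplicity, unsigned digit-product mod MOD, flip-count) triple over the quotient chain, with the sign applied once at the end from the flip-count parity; the product is also accumulated in the opposite (most-significant-first) order.
import Mathlib
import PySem

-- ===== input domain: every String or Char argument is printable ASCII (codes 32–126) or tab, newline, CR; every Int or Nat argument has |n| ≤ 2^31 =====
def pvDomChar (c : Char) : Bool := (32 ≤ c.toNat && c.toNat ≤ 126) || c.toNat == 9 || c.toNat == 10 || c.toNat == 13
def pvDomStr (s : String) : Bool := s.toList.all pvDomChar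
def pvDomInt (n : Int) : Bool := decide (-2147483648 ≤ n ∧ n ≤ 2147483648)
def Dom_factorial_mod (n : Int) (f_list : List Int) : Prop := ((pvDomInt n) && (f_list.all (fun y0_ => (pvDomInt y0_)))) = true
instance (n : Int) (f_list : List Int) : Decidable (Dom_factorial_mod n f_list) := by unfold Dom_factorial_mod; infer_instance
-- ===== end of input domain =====

-- B replaces A's stepwise sign-flipping loop by a recursive chain returning a
-- (multiplicity, unsigned product, flip-count) triple, the sign applied once at the end.

def pvMOD : Int := 1000000007

-- termination helper cited by the loop/recursion definitions of both ports
theorem pv_floordiv_lt (n : Int) (h : 1 < n) : (PySem.Int.floordiv n pvMOD).toNat < n.toNat := by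
  have h1 : PySem.Int.floordiv n pvMOD < n :=
    (PySem.Int.floordiv_lt_iff_lt_mul (by rw [pvMOD]; norm_num)).mpr (by rw [pvMOD]; nlinarith)
  have h2 : (0 : Int) ≤ PySem.Int.floordiv n pvMOD :=
    (PySem.Int.le_floordiv_iff_mul_le (by rw [pvMOD]; norm_num)).mpr (by omega)
  omega

-- ===== PORT A =====
-- A's fused while-loop: state (n, f, m).  f_list[…] is ported as pyGetD with default 0;
-- Pre_ guarantees the index is in range wherever A returns.
def factorial_mod_loop (n f m : Int) (f_list : List Int) : Int × Int :=
  if h : n > 1 then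
    let f1 := if PySem.Int.mod (PySem.Int.floordiv n pvMOD) 2 > 0 then pvMOD - f else f
    let f2 := PySem.Int.mod (f1 * PySem.List.pyGetD f_list (PySem.Int.mod n pvMOD) 0) pvMOD
    let n' := PySem.Int.floordiv n pvMOD
    factorial_mod_loop n' f2 (m + n') f_list
  else (m, f)
termination_by n.toNat
decreasing_by exact pv_floordiv_lt n h

-- Python A returns the list [0, f_list[n]] in the first branch and a tuple in the second;
-- both are ported as the pair Int × Int.
def factorial_mod (n : Int) (f_list : List Int) : Int × Int :=
  if n < pvMOD then (0, PySem.List.pyGetD f_list n 0)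
  else factorial_mod_loop n 1 0 f_list

-- ===== PORT B =====
-- _chain: recursion over the base-MOD quotient chain, returning the triple
-- (multiplicity, unsigned digit product mod MOD, number of sign flips)
def fm_chain (q : Int) (f_list : List Int) : Int × Int × Int :=
  if h : q ≤ 1 then (0, 1, 0)
  else
    let hq := PySem.Int.floordiv q pvMOD
    let r := fm_chain hq f_list
    (r.1 + hq,
     PySem.Int.mod (r.2.1 * PySem.List.pyGetD f_list (PySem.Int.mod q pvMOD) 0) pvMOD,
     r.2.2 + PySem.Int.mod hq 2)
termination_by q.toNat
decreasing_by exact pv_floordiv_lt q (by omega)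

def factorial_mod_alt (n : Int) (f_list : List Int) : Int × Int :=
  if n < pvMOD then (0, PySem.List.pyGetD f_list n 0)
  else
    let r := fm_chain n f_list
    (r.1, PySem.Int.mod (if PySem.Int.mod r.2.2 2 = 1 then -r.2.1 else r.2.1) pvMOD)

-- ===== PRECONDITION & SPEC =====
-- Pre_ excludes exactly the inputs (inside Dom) on which Python A raises IndexError:
-- n < MOD needs n to be a valid index of f_list; n ≥ MOD needs the loop's indices
-- n % MOD and — when a second iteration runs — (n // MOD) % MOD to be in range.
def Pre_factorial_mod (n : Int) (f_list : List Int) : Prop :=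
  if n < pvMOD then PySem.Raise.InRange f_list.length n
  else PySem.Int.mod n pvMOD < (f_list.length : Int) ∧
       (PySem.Int.floordiv n pvMOD ≤ 1 ∨
        PySem.Int.mod (PySem.Int.floordiv n pvMOD) pvMOD < (f_list.length : Int))
instance (n : Int) (f_list : List Int) : Decidable (Pre_factorial_mod n f_list) := by
  unfold Pre_factorial_mod; infer_instance

def pvWitness_factorial_mod : Int × List Int := (5, [1, 1, 2, 6, 24, 120])

def Spec_factorial_mod (n : Int) (f_list : List Int) (out : Int × Int) : Prop := out = factorial_mod_alt n f_list
instance (n : Int) (f_list : List Int) (out : Int × Int) : Decidable (Spec_factorial_mod n f_list out) := by unfold Spec_factorial_mod; infer_instance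

-- ===== CLAIM (what is proved, stated in full; the proofs are below) =====
def Claim_equal_factorial_mod : Prop := ∀ (n : Int) (f_list : List Int), Dom_factorial_mod n f_list → Pre_factorial_mod n f_list → Spec_factorial_mod n f_list (factorial_mod n f_list)

-- ===== LEMMAS AND PROOFS =====

-- the sign a flip-count s denotes
def pvSg (s : Int) : Int := if s % 2 = 1 then -1 else 1

theorem pvSg_add (s t : Int) : pvSg (s + t) = pvSg s * pvSg t := by
  unfold pvSg
  split_ifs <;> omega

theorem emod_self_emod (a : Int) : a % pvMOD % pvMOD = a % pvMOD :=
  Int.emod_emod_of_dvd a dvd_rfl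

theorem pvM_pos : (0 : Int) < pvMOD := by rw [pvMOD]; norm_num

-- one loop step, seen modulo MOD: the stepwise flip-and-multiply equals
-- sign-of-parity times the unsigned product
theorem step_cong (f a P S q : Int) :
    (pvSg S * (((if q % 2 > 0 then pvMOD - f else f) * a) % pvMOD) * P) % pvMOD
      = (pvSg (S + q % 2) * f * ((P * a) % pvMOD)) % pvMOD := by
  have h1 : Int.ModEq pvMOD ((((if q % 2 > 0 then pvMOD - f else f) * a) % pvMOD))
      ((if q % 2 > 0 then pvMOD - f else f) * a) := Int.emod_emod_of_dvd _ dvd_rfl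
  have h2 : Int.ModEq pvMOD ((if q % 2 > 0 then pvMOD - f else f)) (pvSg (q % 2) * f) := by
    unfold pvSg
    have : q % 2 = 0 ∨ q % 2 = 1 := by omega
    rcases this with h | h <;> simp [h]
    have hM0 : Int.ModEq pvMOD pvMOD 0 := Int.modEq_zero_iff_dvd.mpr dvd_rfl
    simpa using hM0.sub_right f
  have h3 : Int.ModEq pvMOD ((P * a) % pvMOD) (P * a) := Int.emod_emod_of_dvd _ dvd_rfl
  calc pvSg S * (((if q % 2 > 0 then pvMOD - f else f) * a) % pvMOD) * P
      ≡ pvSg S * ((if q % 2 > 0 then pvMOD - f else f) * a) * P [ZMOD pvMOD] :=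
        ((h1.mul_left _).mul_right _)
    _ ≡ pvSg S * (pvSg (q % 2) * f * a) * P [ZMOD pvMOD] :=
        ((((h2.mul_right a).mul_left _).mul_right _))
    _ = pvSg (S + q % 2) * f * (P * a) := by rw [pvSg_add]; ring
    _ ≡ pvSg (S + q % 2) * f * ((P * a) % pvMOD) [ZMOD pvMOD] := (h3.symm.mul_left _)

-- the m-component of A's loop equals m plus the chain's multiplicity
theorem loop_m_eq (n : Int) (f_list : List Int) : ∀ f m : Int,
    (factorial_mod_loop n f m f_list).1 = m + (fm_chain n f_list).1 := by
  generalize hk : n.toNat = k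
  induction k using Nat.strong_induction_on generalizing n with
  | _ k IH =>
    intro f m
    rw [factorial_mod_loop, fm_chain]
    by_cases h : n > 1
    · simp only [h, dif_pos, not_le.mpr h, dite_false]
      rw [IH _ (hk ▸ pv_floordiv_lt n h) _ rfl]
      ring
    · simp [h, show n ≤ 1 from not_lt.mp h]

-- the f-component of A's loop equals sign × unsigned product, modulo MOD
theorem loop_f_eq (n : Int) (f_list : List Int) : ∀ f m : Int, 1 < n →
    (factorial_mod_loop n f m f_list).2 =
      (pvSg (fm_chain n f_list).2.2 * f * (fm_chain n f_list).2.1) % pvMOD := by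
  generalize hk : n.toNat = k
  induction k using Nat.strong_induction_on generalizing n with
  | _ k IH =>
    intro f m h
    have hn' : 0 ≤ PySem.Int.floordiv n pvMOD :=
      (PySem.Int.le_floordiv_iff_mul_le pvM_pos).mpr (by omega)
    rw [factorial_mod_loop, fm_chain]
    simp only [h, dif_pos, not_le.mpr h, dite_false]
    simp only [PySem.Int.mod_eq_emod_of_pos pvM_pos,
        PySem.Int.mod_eq_emod_of_pos (show (0:Int) < 2 by norm_num)]
    by_cases h2 : 1 < PySem.Int.floordiv n pvMOD
    · rw [IH _ (hk ▸ pv_floordiv_lt n h) _ rfl _ _ h2]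
      exact step_cong _ _ _ _ _
    · rw [factorial_mod_loop, dif_neg h2, fm_chain, dif_pos (not_lt.mp h2)]
      have hs := step_cong f (PySem.List.pyGetD f_list (n % pvMOD) 0) 1 0
        (PySem.Int.floordiv n pvMOD)
      simpa [pvSg, emod_self_emod] using hs

-- ===== VERDICT (by name: the statement is the Claim_ definition above) =====
theorem factorial_mod_spec : Claim_equal_factorial_mod := by
  intro n f_list _ _
  unfold Spec_factorial_mod factorial_mod factorial_mod_alt
  by_cases h : n < pvMOD
  · simp [h]
  · have hn : 1 < n := by rw [pvMOD] at h; omega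
    simp only [h, if_false]
    refine Prod.ext ?_ ?_
    · show (factorial_mod_loop n 1 0 f_list).1 = (fm_chain n f_list).1
      simpa using loop_m_eq n f_list 1 0
    · show (factorial_mod_loop n 1 0 f_list).2 =
        PySem.Int.mod (if PySem.Int.mod (fm_chain n f_list).2.2 2 = 1
          then -(fm_chain n f_list).2.1 else (fm_chain n f_list).2.1) pvMOD
      rw [loop_f_eq n f_list 1 0 hn]
      simp only [PySem.Int.mod_eq_emod_of_pos (show (0:Int) < 2 by norm_num),
                 PySem.Int.mod_eq_emod_of_pos pvM_pos]
      unfold pvSg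
      split_ifs with hs <;> (congr 1; ring)
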